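-- pv_equiv track=rewrite | github.com/me4n-lee/KRAFTONJUNGLE_03week | dfs/9.py | dfs
-- ===== SOURCE A (Python) =====
-- def dfs(graph, start, visit, inout):
--
--     cnt = 0
--     stack = []
--
--     if inout[start] == 0:  # 실외에서 시작할 수 없으므로
--         return 0
--
--     stack.append(start)
--
--     while stack:
--
--         place = stack.pop()
--
--         if visit[place] == 0:  # 방문하지 않았다면
--             visit[place] = 1
--
--             for new_place in graph[place]:
--
--                 if visit[new_place] == 0:#대체 이걸 왜 생각 못했지??
--
--                     if inout[new_place] == 1: # 실내라면
--                         cnt += 1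
--
--                     elif inout[new_place] == 0: #실외라면
--                         stack.append(new_place)
--
--                 else:
--                     continue
--
--         elif visit[place] == 1: #방문했다면
--             continue
--
--     return cnt
-- ===== SOURCE B (Python) =====
-- def dfs(graph, start, visit, inout):
--     # Recursive DFS decomposition of the same count; mutates `visit` like the original.
--     if inout[start] == 0:  # cannot start outdoors... (indoor start guard kept)
--         return 0
--
--     def explore(place):
--         if visit[place] != 0:
--             return 0
--         visit[place] = 1
--         cnt = 0
--         for nb in graph[place]:
--             if visit[nb] == 0:
--                 if inout[nb] == 1:
--                     cnt += 1
--                 elif inout[nb] == 0: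
--                     cnt += explore(nb)
--         return cnt
--
--     return explore(start)
-- ===== Notes on version B (the rewrite author's own statement) =====
-- stated objective: alternative
-- what changed: The explicit stack + while-loop DFS is re-decomposed as a recursive explorer: a nested explore(place) returns its own subtree count (recursing on unvisited outdoor neighbours, counting unvisited indoor ones), instead of threading one shared counter and stack through a loop; neighbour subtrees are therefore processed in opposite order, which the proof shows cannot change the count.
-- outside the precondition, e.g. on dfs({0: [], 5: [99]}, 0, [0], [1]): A returns 0, B returns 0; on dfs({-2: [], 0: [], 1: []}, -2, [0, 0], [1, 0]): A returns 0, B returns 0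
import Mathlib
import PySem

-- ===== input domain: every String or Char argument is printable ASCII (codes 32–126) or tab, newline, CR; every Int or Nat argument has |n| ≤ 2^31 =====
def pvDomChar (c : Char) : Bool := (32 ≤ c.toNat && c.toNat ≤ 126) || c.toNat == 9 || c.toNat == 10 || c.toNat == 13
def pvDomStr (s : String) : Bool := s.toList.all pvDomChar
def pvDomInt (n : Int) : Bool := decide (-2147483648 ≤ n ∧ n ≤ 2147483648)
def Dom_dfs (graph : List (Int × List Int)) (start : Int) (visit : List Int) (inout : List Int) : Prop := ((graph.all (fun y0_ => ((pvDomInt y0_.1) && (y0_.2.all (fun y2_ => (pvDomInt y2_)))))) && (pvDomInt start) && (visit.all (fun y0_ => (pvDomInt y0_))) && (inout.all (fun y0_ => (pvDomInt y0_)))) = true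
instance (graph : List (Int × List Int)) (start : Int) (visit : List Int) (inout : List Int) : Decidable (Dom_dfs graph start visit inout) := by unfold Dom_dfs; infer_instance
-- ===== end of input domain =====

-- B re-implements A's stack-based count as a recursive DFS (different decomposition, same cost);
-- the equivalence proved here is about the RETURN value (both programs mark `visit` in place the same way on Pre_ inputs).

-- `graph[k]` (dict, first-match lookup).  A missing key is a Python KeyError, excluded by Pre_;
-- there the ports read [] (an inert value, never reached under Pre_).
def pvGetG (graph : List (Int × List Int)) (k : Int) : List Int :=
  match graph.find? (fun pr => pr.1 == k) with
  | some pr => pr.2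
  | none => []

-- Termination fact for the ports' loops: marking a 0-cell strictly decreases the number of 0-cells.
theorem pv_zeros_set_lt {v : List Int} {p : Int} (h : PySem.List.pyGetD v p 1 = 0) :
    (PySem.List.pySetD v p 1).count 0 < v.count 0 := by
  unfold PySem.List.pyGetD PySem.List.pyGet? PySem.List.pySetD PySem.List.pySet? at *
  cases hk : PySem.List.pyIdx? v.length p with
  | none => rw [hk] at h; simp at h
  | some k =>
    rw [hk] at h
    simp only [Option.map_some, Option.getD_some]
    simp only [Option.bind_some] at h
    cases hg : v[k]? with
    | none => rw [hg] at h; simp at h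
    | some x =>
      rw [hg] at h
      simp only [Option.getD_some] at h
      subst h
      have hklen : k < v.length := by
        by_contra hn
        rw [List.getElem?_eq_none (by omega)] at hg
        cases hg
      have hv0 : v[k] = 0 := by
        rw [List.getElem?_eq_getElem hklen] at hg
        injection hg with hh
      rw [List.count_set hklen]
      simp [hv0]
      exact hv0 ▸ List.getElem_mem hklen

-- ===== PORT A =====
-- A's while-loop over the explicit stack.  The stack is kept head-first (head = Python's list end,
-- the element `.pop()` removes); `stack.append` of the pushes v1..vk in loop order therefore conses
-- them, so the accumulated push list is already in popping order and is prepended as-is.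
-- Out-of-range reads are Python IndexErrors, excluded by Pre_; the ports read an inert default there.
def dfsLoop (graph : List (Int × List Int)) (inout : List Int) (visit : List Int) (stack : List Int) (cnt : Int) : Int :=
  match stack with
  | [] => cnt
  | place :: rest =>
    if hv : PySem.List.pyGetD visit place 1 = 0 then
      let visit' := PySem.List.pySetD visit place 1
      let step := (pvGetG graph place).foldl (fun (acc : Int × List Int) nb =>
          if PySem.List.pyGetD visit' nb 1 = 0 then
            if PySem.List.pyGetD inout nb 0 = 1 then (acc.1 + 1, acc.2)
            else if PySem.List.pyGetD inout nb 0 = 0 then (acc.1, nb :: acc.2)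
            else acc
          else acc) (cnt, [])
      dfsLoop graph inout visit' (step.2 ++ rest) step.1
    else
      dfsLoop graph inout visit rest cnt
termination_by (visit.count 0, stack.length)
decreasing_by
  · exact Prod.Lex.left _ _ (pv_zeros_set_lt hv)
  · exact Prod.Lex.right _ (Nat.lt_succ_self _)

def dfs (graph : List (Int × List Int)) (start : Int) (visit : List Int) (inout : List Int) : Int :=
  if PySem.List.pyGetD inout start 0 = 0 then 0
  else dfsLoop graph inout visit [start] 0

-- ===== PORT B =====
-- B's recursive DFS (from Source B).  `fuel` is only a totality guard: the recursion depth is bounded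
-- by the number of 0-cells of `visit` (each recursive call first marks a 0-cell), so with the fuel
-- dfs_alt passes the 0-fuel branch is never reached.
mutual
def exploreB (graph : List (Int × List Int)) (inout : List Int) (fuel : Nat) (visit : List Int) (place : Int) : Int × List Int :=
  match fuel with
  | 0 => (0, visit)
  | f + 1 =>
    if PySem.List.pyGetD visit place 1 ≠ 0 then (0, visit)
    else exploreNbrs graph inout f (PySem.List.pySetD visit place 1) (pvGetG graph place)
termination_by (fuel, 0)

def exploreNbrs (graph : List (Int × List Int)) (inout : List Int) (fuel : Nat) (visit : List Int) (nbrs : List Int) : Int × List Int :=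
  match nbrs with
  | [] => (0, visit)
  | nb :: rest =>
    if PySem.List.pyGetD visit nb 1 = 0 then
      if PySem.List.pyGetD inout nb 0 = 1 then
        let r := exploreNbrs graph inout fuel visit rest
        (1 + r.1, r.2)
      else if PySem.List.pyGetD inout nb 0 = 0 then
        let r1 := exploreB graph inout fuel visit nb
        let r2 := exploreNbrs graph inout fuel r1.2 rest
        (r1.1 + r2.1, r2.2)
      else exploreNbrs graph inout fuel visit rest
    else exploreNbrs graph inout fuel visit rest
termination_by (fuel, nbrs.length + 1)
end

def dfs_alt (graph : List (Int × List Int)) (start : Int) (visit : List Int) (inout : List Int) : Int :=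
  if PySem.List.pyGetD inout start 0 = 0 then 0
  else (exploreB graph inout (visit.count 0 + 1) visit start).1

-- ===== PRECONDITION & SPEC =====
-- Pre_ = inputs on which Python A returns normally, layered exactly like A's control flow.
-- The last layer (a real traversal happens) over-approximates what the traversal touches: it asks
-- every neighbour listed anywhere in `graph` to be a valid non-negative index of `visit`/`inout`
-- (and every outdoor one to be a key of `graph`, as `start` must be), and asks 0 ≤ start, where A
-- itself only needs this for the entries its traversal actually reaches (and would accept an
-- in-range negative `start` by Python's wraparound); A still returns on such excluded inputs.
def Pre_dfs (graph : List (Int × List Int)) (start : Int) (visit : List Int) (inout : List Int) : Prop :=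
  PySem.Raise.InRange inout.length start ∧
  (PySem.List.pyGetD inout start 0 = 0 ∨
    (PySem.Raise.InRange visit.length start ∧
      (PySem.List.pyGetD visit start 1 ≠ 0 ∨
        (0 ≤ start ∧ (graph.find? (fun pr => pr.1 == start)).isSome ∧
         ∀ pr ∈ graph, ∀ nb ∈ pr.2,
           0 ≤ nb ∧ nb < (visit.length : Int) ∧ nb < (inout.length : Int) ∧
           (PySem.List.pyGetD inout nb 0 = 0 → (graph.find? (fun q => q.1 == nb)).isSome)))))
instance (graph : List (Int × List Int)) (start : Int) (visit : List Int) (inout : List Int) : Decidable (Pre_dfs graph start visit inout) := by unfold Pre_dfs; infer_instance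

def pvWitness_dfs : (List (Int × List Int)) × Int × List Int × List Int :=
  ([(0, [1, 2]), (1, [2]), (2, [0, 1])], 0, [0, 0, 0], [1, 0, 1])

def Spec_dfs (graph : List (Int × List Int)) (start : Int) (visit : List Int) (inout : List Int) (out : Int) : Prop := out = dfs_alt graph start visit inout
instance (graph : List (Int × List Int)) (start : Int) (visit : List Int) (inout : List Int) (out : Int) : Decidable (Spec_dfs graph start visit inout out) := by unfold Spec_dfs; infer_instance

-- ===== CLAIM (what is proved, stated in full; the proofs are below) =====
def Claim_equal_dfs : Prop := ∀ (graph : List (Int × List Int)) (start : Int) (visit : List Int) (inout : List Int), Dom_dfs graph start visit inout → Pre_dfs graph start visit inout → Spec_dfs graph start visit inout (dfs graph start visit inout)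

-- ===== LEMMAS AND PROOFS =====

-- Proof-side machinery: `eRun` is an order-robust reference semantics for the shared traversal;
-- both ports are proved equal to it.

-- index-cell facts about pyGetD/pySetD used throughout
theorem pv_pyIdx_lt {n : Nat} {p : Int} {k : Nat} (h : PySem.List.pyIdx? n p = some k) : k < n := by
  unfold PySem.List.pyIdx? at h
  split_ifs at h with h1 h2 h3
  all_goals first
    | (injection h with hh; omega)
    | cases h

theorem pv_zeros_set_le (v : List Int) (p : Int) :
    (PySem.List.pySetD v p 1).count 0 ≤ v.count 0 := by
  unfold PySem.List.pySetD PySem.List.pySet?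
  cases hk : PySem.List.pyIdx? v.length p with
  | none => simp
  | some k =>
    have hklen : k < v.length := pv_pyIdx_lt hk
    simp only [Option.map_some, Option.getD_some]
    rw [List.count_set hklen]
    split_ifs <;> simp_all <;> omega

theorem pv_getD_nonneg (v : List Int) {m : Int} (d : Int) (h : 0 ≤ m) :
    PySem.List.pyGetD v m d = (v[m.toNat]?).getD d := by
  unfold PySem.List.pyGetD
  rw [PySem.List.pyGet?_of_nonneg v h]

theorem pv_get_set_ne (v : List Int) {p m : Int} (d : Int) (hp : 0 ≤ p) (hm : 0 ≤ m) (hne : m ≠ p) :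
    PySem.List.pyGetD (PySem.List.pySetD v p 1) m d = PySem.List.pyGetD v m d := by
  rw [PySem.List.pySetD_of_nonneg v 1 hp, pv_getD_nonneg _ d hm, pv_getD_nonneg _ d hm]
  rw [List.getElem?_set_ne (by omega)]

theorem pv_set_comm (v : List Int) {p q : Int} (hp : 0 ≤ p) (hq : 0 ≤ q) (hne : p ≠ q) :
    PySem.List.pySetD (PySem.List.pySetD v p 1) q 1 = PySem.List.pySetD (PySem.List.pySetD v q 1) p 1 := by
  rw [PySem.List.pySetD_of_nonneg v 1 hp, PySem.List.pySetD_of_nonneg v 1 hq,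
      PySem.List.pySetD_of_nonneg _ 1 hq, PySem.List.pySetD_of_nonneg _ 1 hp]
  exact List.set_comm _ _ (by omega)

-- a node is a valid non-negative index of both arrays
def pvGoodN (nV : Nat) (inout : List Int) (x : Int) : Prop :=
  0 ≤ x ∧ x < (nV : Int) ∧ x < (inout.length : Int)

-- every neighbour listed in the graph is a good node
def pvGoodG (graph : List (Int × List Int)) (inout : List Int) (nV : Nat) : Prop :=
  ∀ pr ∈ graph, ∀ nb ∈ pr.2, pvGoodN nV inout nb

-- a worklist of good outdoor nodes
def pvGoodL (nV : Nat) (inout : List Int) (l : List Int) : Prop :=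
  ∀ x ∈ l, pvGoodN nV inout x ∧ PySem.List.pyGetD inout x 0 = 0

-- indoor still-unvisited neighbours counted when a node is expanded
def pvIndC (inout v nbrs : List Int) : Int :=
  ((nbrs.filter fun nb =>
      (PySem.List.pyGetD inout nb 0 == 1) && (PySem.List.pyGetD v nb 1 == 0)).length : Int)

-- outdoor neighbours
def pvOuts (inout nbrs : List Int) : List Int :=
  nbrs.filter fun nb => PySem.List.pyGetD inout nb 0 == 0

-- reference traversal: expand the worklist head if it is an unvisited (0) cell, queueing ALL its
-- outdoor neighbours (visited ones are skipped when reached, which does not change the result)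
def eRun (graph : List (Int × List Int)) (inout : List Int) (visit : List Int) (pend : List Int) : Int × List Int :=
  match pend with
  | [] => (0, visit)
  | p :: ps =>
    if h : 0 ≤ p ∧ PySem.List.pyGetD visit p 1 = 0 then
      (pvIndC inout (PySem.List.pySetD visit p 1) (pvGetG graph p) +
         (eRun graph inout (PySem.List.pySetD visit p 1) (pvOuts inout (pvGetG graph p) ++ ps)).1,
       (eRun graph inout (PySem.List.pySetD visit p 1) (pvOuts inout (pvGetG graph p) ++ ps)).2)
    else eRun graph inout visit ps
termination_by (visit.count 0, pend.length)
decreasing_by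
  · exact Prod.Lex.left _ _ (pv_zeros_set_lt h.2)
  · exact Prod.Lex.right _ (Nat.lt_succ_self _)

theorem eRun_zeros_le (graph : List (Int × List Int)) (inout visit pend : List Int) :
    (eRun graph inout visit pend).2.count 0 ≤ visit.count 0 := by
  induction visit, pend using eRun.induct graph inout with
  | case1 v => rw [eRun]
  | case2 v p ps h ih =>
    rw [eRun, dif_pos h]
    exact le_trans ih (pv_zeros_set_lt h.2).le
  | case3 v p ps h ih =>
    rw [eRun, dif_neg h]; exact ih

theorem eRun_stable (graph : List (Int × List Int)) (inout visit pend : List Int)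
    (hl : ∀ x ∈ pend, PySem.List.pyGetD inout x 0 = 0) (m : Int)
    (hm : 0 ≤ m) (hio : PySem.List.pyGetD inout m 0 ≠ 0) :
    PySem.List.pyGetD (eRun graph inout visit pend).2 m 1 = PySem.List.pyGetD visit m 1 := by
  induction visit, pend using eRun.induct graph inout with
  | case1 v => rw [eRun]
  | case2 v p ps hc ih =>
    rw [eRun, dif_pos hc]
    have hp0 : PySem.List.pyGetD inout p 0 = 0 := hl p (List.mem_cons_self ..)
    have hne : m ≠ p := fun he => hio (he ▸ hp0)
    rw [ih ?_, pv_get_set_ne v 1 hc.1 hm hne]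
    intro x hx
    rcases List.mem_append.mp hx with hx | hx
    · have := List.mem_filter.mp hx
      simpa using this.2
    · exact hl x (List.mem_cons_of_mem _ hx)
  | case3 v p ps hc ih =>
    rw [eRun, dif_neg hc]
    exact ih fun x hx => hl x (List.mem_cons_of_mem _ hx)

theorem eRun_cons_pos (graph : List (Int × List Int)) (inout v : List Int) (p : Int) (ps : List Int)
    (hc : 0 ≤ p ∧ PySem.List.pyGetD v p 1 = 0) :
    eRun graph inout v (p :: ps) =
      (pvIndC inout (PySem.List.pySetD v p 1) (pvGetG graph p) +
         (eRun graph inout (PySem.List.pySetD v p 1) (pvOuts inout (pvGetG graph p) ++ ps)).1,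
       (eRun graph inout (PySem.List.pySetD v p 1) (pvOuts inout (pvGetG graph p) ++ ps)).2) := by
  rw [eRun, dif_pos hc]

theorem eRun_cons_neg (graph : List (Int × List Int)) (inout v : List Int) (p : Int) (ps : List Int)
    (hc : ¬(0 ≤ p ∧ PySem.List.pyGetD v p 1 = 0)) :
    eRun graph inout v (p :: ps) = eRun graph inout v ps := by
  rw [eRun, dif_neg hc]

theorem eRun_nil (graph : List (Int × List Int)) (inout v : List Int) :
    eRun graph inout v [] = (0, v) := by rw [eRun]

theorem eRun_append (graph : List (Int × List Int)) (inout visit l1 : List Int) :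
    ∀ l2, eRun graph inout visit (l1 ++ l2) =
      ((eRun graph inout visit l1).1 + (eRun graph inout (eRun graph inout visit l1).2 l2).1,
       (eRun graph inout (eRun graph inout visit l1).2 l2).2) := by
  induction visit, l1 using eRun.induct graph inout with
  | case1 v => intro l2; simp [eRun_nil]
  | case2 v p ps hc ih =>
    intro l2
    rw [List.cons_append, eRun_cons_pos _ _ _ _ _ hc, eRun_cons_pos _ _ _ _ _ hc]
    rw [show pvOuts inout (pvGetG graph p) ++ (ps ++ l2)
          = (pvOuts inout (pvGetG graph p) ++ ps) ++ l2 from (List.append_assoc ..).symm]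
    rw [ih l2]
    simp [add_assoc]
  | case3 v p ps hc ih =>
    intro l2
    rw [List.cons_append, eRun_cons_neg _ _ _ _ _ hc, eRun_cons_neg _ _ _ _ _ hc]
    exact ih l2


-- lists of non-negative outdoor nodes (what worklists contain after the first step)
def pvOkL (inout l : List Int) : Prop :=
  ∀ x ∈ l, 0 ≤ x ∧ PySem.List.pyGetD inout x 0 = 0

theorem pvOk_getG {graph : List (Int × List Int)} {inout : List Int} {nV : Nat}
    (hG : pvGoodG graph inout nV) (p : Int) : ∀ x ∈ pvGetG graph p, 0 ≤ x := by
  intro x hx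
  unfold pvGetG at hx
  cases hf : graph.find? (fun pr => pr.1 == p) with
  | none => rw [hf] at hx; cases hx
  | some pr =>
    rw [hf] at hx
    exact (hG pr (List.mem_of_find?_eq_some hf) x hx).1

theorem pvOkL_outs {graph : List (Int × List Int)} {inout : List Int} {nV : Nat}
    (hG : pvGoodG graph inout nV) (p : Int) : pvOkL inout (pvOuts inout (pvGetG graph p)) := by
  intro x hx
  have hm := List.mem_filter.mp hx
  refine ⟨pvOk_getG hG p x hm.1, ?_⟩
  simpa using hm.2

theorem pvIndC_congr {inout v v' : List Int} (nbrs : List Int)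
    (h : ∀ x ∈ nbrs, PySem.List.pyGetD inout x 0 = 1 →
          PySem.List.pyGetD v' x 1 = PySem.List.pyGetD v x 1) :
    pvIndC inout v' nbrs = pvIndC inout v nbrs := by
  unfold pvIndC
  congr 2
  apply List.filter_congr
  intro x hx
  by_cases h1 : PySem.List.pyGetD inout x 0 = 1
  · rw [h x hx h1]
  · rw [show (PySem.List.pyGetD inout x 0 == 1) = false from beq_eq_false_iff_ne.mpr h1]
    simp

-- marking an outdoor cell never changes the indoor count of any neighbour list
theorem pvIndC_set {inout v : List Int} {b : Int} (nbrs : List Int)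
    (hb0 : 0 ≤ b) (hbo : PySem.List.pyGetD inout b 0 = 0) (hn : ∀ x ∈ nbrs, 0 ≤ x) :
    pvIndC inout (PySem.List.pySetD v b 1) nbrs = pvIndC inout v nbrs := by
  apply pvIndC_congr
  intro x hx h1
  have hne : x ≠ b := fun he => by rw [he, hbo] at h1; cases h1
  exact pv_get_set_ne v 1 hb0 (hn x hx) hne

-- running the traversal over outdoor nodes never changes the indoor count either
theorem pvIndC_eRun {graph : List (Int × List Int)} {inout v pend : List Int} (nbrs : List Int)
    (hpend : ∀ x ∈ pend, PySem.List.pyGetD inout x 0 = 0) (hn : ∀ x ∈ nbrs, 0 ≤ x) :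
    pvIndC inout (eRun graph inout v pend).2 nbrs = pvIndC inout v nbrs := by
  apply pvIndC_congr
  intro x hx h1
  exact eRun_stable graph inout v pend hpend x (hn x hx) (by rw [h1]; decide)

-- THE KEY LEMMA: on a worklist of non-negative outdoor nodes the traversal's result
-- (count AND final visit array) is invariant under permutation of the worklist.
theorem eRun_perm {graph : List (Int × List Int)} {inout : List Int} {nV : Nat}
    (hG : pvGoodG graph inout nV) :
    ∀ (z : Nat) (l1 l2 : List Int), l1.Perm l2 → ∀ v : List Int, v.count 0 ≤ z →
      pvOkL inout l1 → eRun graph inout v l1 = eRun graph inout v l2 := by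
  intro z
  induction z using Nat.strong_induction_on with
  | _ z IH =>
  intro l1 l2 hperm
  induction hperm with
  | nil => intro v hz hok; rfl
  | cons x hsub ihsub =>
    rename_i t1 t2
    intro v hz hok
    by_cases hc : 0 ≤ x ∧ PySem.List.pyGetD v x 1 = 0
    · rw [eRun_cons_pos _ _ _ _ _ hc, eRun_cons_pos _ _ _ _ _ hc]
      have key : eRun graph inout (PySem.List.pySetD v x 1) (pvOuts inout (pvGetG graph x) ++ t1)
               = eRun graph inout (PySem.List.pySetD v x 1) (pvOuts inout (pvGetG graph x) ++ t2) := by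
        apply IH ((PySem.List.pySetD v x 1).count 0)
          (lt_of_lt_of_le (pv_zeros_set_lt hc.2) hz)
          _ _ (hsub.append_left _) _ le_rfl
        intro y hy
        rcases List.mem_append.mp hy with hy | hy
        · exact pvOkL_outs hG x y hy
        · exact hok y (List.mem_cons_of_mem _ hy)
      rw [key]
    · rw [eRun_cons_neg _ _ _ _ _ hc, eRun_cons_neg _ _ _ _ _ hc]
      exact ihsub v hz (fun y hy => hok y (List.mem_cons_of_mem _ hy))
  | swap a b t =>
    -- goal: eRun v (b :: a :: t) = eRun v (a :: b :: t)
    intro v hz hok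
    have hb := hok b (List.mem_cons_self ..)
    have ha := hok a (List.mem_cons_of_mem _ (List.mem_cons_self ..))
    have hokt : pvOkL inout t := fun y hy =>
      hok y (List.mem_cons_of_mem _ (List.mem_cons_of_mem _ hy))
    by_cases hab : b = a
    · subst hab; rfl
    have hokbt : pvOkL inout (pvOuts inout (pvGetG graph b) ++ t) := by
      intro y hy
      rcases List.mem_append.mp hy with hy | hy
      · exact pvOkL_outs hG b y hy
      · exact hokt y hy
    have hokat : pvOkL inout (pvOuts inout (pvGetG graph a) ++ t) := by
      intro y hy
      rcases List.mem_append.mp hy with hy | hy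
      · exact pvOkL_outs hG a y hy
      · exact hokt y hy
    by_cases hcb : PySem.List.pyGetD v b 1 = 0 <;>
      by_cases hca : PySem.List.pyGetD v a 1 = 0
    · -- both eligible
      have hgb : (0:Int) ≤ b ∧ PySem.List.pyGetD v b 1 = 0 := ⟨hb.1, hcb⟩
      have hga : (0:Int) ≤ a ∧ PySem.List.pyGetD v a 1 = 0 := ⟨ha.1, hca⟩
      rw [eRun_cons_pos _ _ _ _ _ hgb, eRun_cons_pos _ _ _ _ _ hga]
      have hzb := lt_of_lt_of_le (pv_zeros_set_lt hcb) hz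
      have hza := lt_of_lt_of_le (pv_zeros_set_lt hca) hz
      have hLb : eRun graph inout (PySem.List.pySetD v b 1) (pvOuts inout (pvGetG graph b) ++ a :: t)
               = eRun graph inout (PySem.List.pySetD v b 1) (a :: (pvOuts inout (pvGetG graph b) ++ t)) := by
        apply IH ((PySem.List.pySetD v b 1).count 0) hzb _ _ List.perm_middle _ le_rfl
        intro y hy
        rcases List.mem_append.mp hy with hy | hy
        · exact pvOkL_outs hG b y hy
        · rcases List.mem_cons.mp hy with hy | hy
          · exact hy ▸ ha
          · exact hokt y hy
      have hLa : eRun graph inout (PySem.List.pySetD v a 1) (pvOuts inout (pvGetG graph a) ++ b :: t)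
               = eRun graph inout (PySem.List.pySetD v a 1) (b :: (pvOuts inout (pvGetG graph a) ++ t)) := by
        apply IH ((PySem.List.pySetD v a 1).count 0) hza _ _ List.perm_middle _ le_rfl
        intro y hy
        rcases List.mem_append.mp hy with hy | hy
        · exact pvOkL_outs hG a y hy
        · rcases List.mem_cons.mp hy with hy | hy
          · exact hy ▸ hb
          · exact hokt y hy
      rw [hLb, hLa]
      have hcab : PySem.List.pyGetD (PySem.List.pySetD v b 1) a 1 = 0 := by
        rw [pv_get_set_ne v 1 hb.1 ha.1 (fun h => hab h.symm)]; exact hca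
      have hcba : PySem.List.pyGetD (PySem.List.pySetD v a 1) b 1 = 0 := by
        rw [pv_get_set_ne v 1 ha.1 hb.1 hab]; exact hcb
      rw [eRun_cons_pos _ _ _ _ _ ⟨ha.1, hcab⟩, eRun_cons_pos _ _ _ _ _ ⟨hb.1, hcba⟩]
      have hvv : PySem.List.pySetD (PySem.List.pySetD v b 1) a 1
               = PySem.List.pySetD (PySem.List.pySetD v a 1) b 1 :=
        pv_set_comm v hb.1 ha.1 hab
      rw [hvv]
      -- indoor counts: marking one outdoor node does not change the other's count
      have hIa : pvIndC inout (PySem.List.pySetD (PySem.List.pySetD v a 1) b 1) (pvGetG graph a)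
               = pvIndC inout (PySem.List.pySetD v a 1) (pvGetG graph a) :=
        pvIndC_set _ hb.1 hb.2 (pvOk_getG hG a)
      have hIb : pvIndC inout (PySem.List.pySetD (PySem.List.pySetD v a 1) b 1) (pvGetG graph b)
               = pvIndC inout (PySem.List.pySetD v b 1) (pvGetG graph b) := by
        rw [← hvv]
        exact pvIndC_set _ ha.1 ha.2 (pvOk_getG hG b)
      rw [hIa, hIb]
      -- tails are permutations of each other over the same (doubly marked) array
      have hzab : (PySem.List.pySetD (PySem.List.pySetD v a 1) b 1).count 0 < z :=
        lt_of_le_of_lt (pv_zeros_set_le _ _) hza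
      have htail : eRun graph inout (PySem.List.pySetD (PySem.List.pySetD v a 1) b 1)
                     (pvOuts inout (pvGetG graph b) ++ (pvOuts inout (pvGetG graph a) ++ t))
                 = eRun graph inout (PySem.List.pySetD (PySem.List.pySetD v a 1) b 1)
                     (pvOuts inout (pvGetG graph a) ++ (pvOuts inout (pvGetG graph b) ++ t)) := by
        apply IH _ hzab _ _ ?_ _ le_rfl
        · intro y hy
          rcases List.mem_append.mp hy with hy | hy
          · exact pvOkL_outs hG b y hy
          · exact hokat y hy
        · rw [← List.append_assoc, ← List.append_assoc]
          exact List.perm_append_comm.append_right t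
      rw [htail]
      simp only [Prod.mk.injEq]
      exact ⟨by ring, trivial⟩
    · -- b eligible, a not
      have hgb : (0:Int) ≤ b ∧ PySem.List.pyGetD v b 1 = 0 := ⟨hb.1, hcb⟩
      have hga : ¬((0:Int) ≤ a ∧ PySem.List.pyGetD v a 1 = 0) := fun h => hca h.2
      rw [eRun_cons_pos _ _ _ _ _ hgb, eRun_cons_neg _ _ _ _ _ hga,
          eRun_cons_pos _ _ _ _ _ hgb]
      have hzb := lt_of_lt_of_le (pv_zeros_set_lt hcb) hz
      have hpull : eRun graph inout (PySem.List.pySetD v b 1) (pvOuts inout (pvGetG graph b) ++ a :: t)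
                 = eRun graph inout (PySem.List.pySetD v b 1) (a :: (pvOuts inout (pvGetG graph b) ++ t)) := by
        apply IH ((PySem.List.pySetD v b 1).count 0) hzb _ _ List.perm_middle _ le_rfl
        intro y hy
        rcases List.mem_append.mp hy with hy | hy
        · exact pvOkL_outs hG b y hy
        · rcases List.mem_cons.mp hy with hy | hy
          · exact hy ▸ ha
          · exact hokt y hy
      rw [hpull]
      have hskip : ¬((0:Int) ≤ a ∧ PySem.List.pyGetD (PySem.List.pySetD v b 1) a 1 = 0) := by
        intro h
        rw [pv_get_set_ne v 1 hb.1 ha.1 (fun he => hab he.symm)] at h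
        exact hca h.2
      rw [eRun_cons_neg _ _ _ _ _ hskip]
    · -- a eligible, b not
      have hga : (0:Int) ≤ a ∧ PySem.List.pyGetD v a 1 = 0 := ⟨ha.1, hca⟩
      have hgb : ¬((0:Int) ≤ b ∧ PySem.List.pyGetD v b 1 = 0) := fun h => hcb h.2
      rw [eRun_cons_neg _ _ _ _ _ hgb, eRun_cons_pos _ _ _ _ _ hga,
          eRun_cons_pos _ _ _ _ _ hga]
      have hza := lt_of_lt_of_le (pv_zeros_set_lt hca) hz
      have hpull : eRun graph inout (PySem.List.pySetD v a 1) (pvOuts inout (pvGetG graph a) ++ b :: t)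
                 = eRun graph inout (PySem.List.pySetD v a 1) (b :: (pvOuts inout (pvGetG graph a) ++ t)) := by
        apply IH ((PySem.List.pySetD v a 1).count 0) hza _ _ List.perm_middle _ le_rfl
        intro y hy
        rcases List.mem_append.mp hy with hy | hy
        · exact pvOkL_outs hG a y hy
        · rcases List.mem_cons.mp hy with hy | hy
          · exact hy ▸ hb
          · exact hokt y hy
      rw [hpull]
      have hskip : ¬((0:Int) ≤ b ∧ PySem.List.pyGetD (PySem.List.pySetD v a 1) b 1 = 0) := by
        intro h
        rw [pv_get_set_ne v 1 ha.1 hb.1 hab] at h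
        exact hcb h.2
      rw [eRun_cons_neg _ _ _ _ _ hskip]
    · -- both ineligible
      have hgb : ¬((0:Int) ≤ b ∧ PySem.List.pyGetD v b 1 = 0) := fun h => hcb h.2
      have hga : ¬((0:Int) ≤ a ∧ PySem.List.pyGetD v a 1 = 0) := fun h => hca h.2
      rw [eRun_cons_neg _ _ _ _ _ hgb, eRun_cons_neg _ _ _ _ _ hga,
          eRun_cons_neg _ _ _ _ _ hga, eRun_cons_neg _ _ _ _ _ hgb]
  | trans h12 h23 ih12 ih23 =>
    intro v hz hok
    rw [ih12 v hz hok]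
    refine ih23 v hz ?_
    intro y hy
    exact hok y (h12.mem_iff.mpr hy)


-- setting a cell to 1 can never turn a non-zero reading into zero
theorem pv_keep_ne0 (v : List Int) (c x : Int) (h : PySem.List.pyGetD v x 1 ≠ 0) :
    PySem.List.pyGetD (PySem.List.pySetD v c 1) x 1 ≠ 0 := by
  unfold PySem.List.pySetD PySem.List.pySet?
  cases hk : PySem.List.pyIdx? v.length c with
  | none => simpa using h
  | some k =>
    simp only [Option.map_some, Option.getD_some]
    unfold PySem.List.pyGetD PySem.List.pyGet? at *
    rw [List.length_set]
    cases hj : PySem.List.pyIdx? v.length x with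
    | none => simpa using h
    | some j =>
      rw [hj] at h
      simp only [Option.bind_some] at h ⊢
      by_cases hjk : k = j
      · subst hjk
        rw [List.getElem?_set_self (pv_pyIdx_lt hk)]
        simp
      · rw [List.getElem?_set_ne hjk]
        exact h

-- visited nodes in the worklist are skipped: filtering them out beforehand changes nothing
theorem eRun_filter (graph : List (Int × List Int)) (inout v0 : List Int) :
    ∀ z : Nat, ∀ v : List Int, v.count 0 ≤ z →
      (∀ x, PySem.List.pyGetD v0 x 1 ≠ 0 → PySem.List.pyGetD v x 1 ≠ 0) →
      ∀ pre l rest,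
        eRun graph inout v (pre ++ ((l.filter fun x => PySem.List.pyGetD v0 x 1 == 0) ++ rest))
          = eRun graph inout v (pre ++ (l ++ rest)) := by
  intro z
  induction z using Nat.strong_induction_on with
  | _ z IH =>
  intro v hz hmono pre
  induction pre with
  | nil =>
    intro l rest
    simp only [List.nil_append]
    induction l with
    | nil => simp
    | cons x l' ihl =>
      by_cases hq : PySem.List.pyGetD v0 x 1 = 0
      · rw [List.filter_cons_of_pos (by simpa using hq)]
        by_cases hc : 0 ≤ x ∧ PySem.List.pyGetD v x 1 = 0
        · rw [List.cons_append, List.cons_append,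
              eRun_cons_pos _ _ _ _ _ hc, eRun_cons_pos _ _ _ _ _ hc]
          have hmono' : ∀ y, PySem.List.pyGetD v0 y 1 ≠ 0 →
              PySem.List.pyGetD (PySem.List.pySetD v x 1) y 1 ≠ 0 :=
            fun y hy => pv_keep_ne0 v x y (hmono y hy)
          have := IH ((PySem.List.pySetD v x 1).count 0)
            (lt_of_lt_of_le (pv_zeros_set_lt hc.2) hz) _ le_rfl hmono'
            (pvOuts inout (pvGetG graph x)) l' rest
          rw [this]
        · rw [List.cons_append, List.cons_append,
              eRun_cons_neg _ _ _ _ _ hc, eRun_cons_neg _ _ _ _ _ hc]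
          exact ihl
      · rw [List.filter_cons_of_neg (by simpa using hq)]
        have hx : PySem.List.pyGetD v x 1 ≠ 0 := hmono x hq
        rw [List.cons_append, eRun_cons_neg _ _ _ _ _ (fun h => hx h.2)]
        exact ihl
  | cons c pre' ihp =>
    intro l rest
    rw [List.cons_append, List.cons_append]
    by_cases hc : 0 ≤ c ∧ PySem.List.pyGetD v c 1 = 0
    · rw [eRun_cons_pos _ _ _ _ _ hc, eRun_cons_pos _ _ _ _ _ hc]
      have hmono' : ∀ y, PySem.List.pyGetD v0 y 1 ≠ 0 →
          PySem.List.pyGetD (PySem.List.pySetD v c 1) y 1 ≠ 0 :=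
        fun y hy => pv_keep_ne0 v c y (hmono y hy)
      have := IH ((PySem.List.pySetD v c 1).count 0)
        (lt_of_lt_of_le (pv_zeros_set_lt hc.2) hz) _ le_rfl hmono'
        (pvOuts inout (pvGetG graph c) ++ pre') l rest
      rw [List.append_assoc, List.append_assoc] at this
      rw [this]
    · rw [eRun_cons_neg _ _ _ _ _ hc, eRun_cons_neg _ _ _ _ _ hc]
      exact ihp l rest

-- what A's inner for-loop over graph[place] computes: the indoor count and the pushes
theorem foldA_char (inout v' : List Int) (nbrs : List Int) : ∀ (c : Int) (s : List Int),
    nbrs.foldl (fun (acc : Int × List Int) nb =>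
        if PySem.List.pyGetD v' nb 1 = 0 then
          if PySem.List.pyGetD inout nb 0 = 1 then (acc.1 + 1, acc.2)
          else if PySem.List.pyGetD inout nb 0 = 0 then (acc.1, nb :: acc.2)
          else acc
        else acc) (c, s)
      = (c + pvIndC inout v' nbrs,
         ((pvOuts inout nbrs).filter fun nb => PySem.List.pyGetD v' nb 1 == 0).reverse ++ s) := by
  induction nbrs with
  | nil => intro c s; simp [pvIndC, pvOuts]
  | cons x rest ih =>
    intro c s
    rw [List.foldl_cons]
    have indc : pvIndC inout v' (x :: rest)
        = (if (PySem.List.pyGetD inout x 0 == 1) && (PySem.List.pyGetD v' x 1 == 0)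
           then 1 else 0) + pvIndC inout v' rest := by
      unfold pvIndC
      rw [List.filter_cons]
      split_ifs <;> simp <;> omega
    have outc : pvOuts inout (x :: rest)
        = (if PySem.List.pyGetD inout x 0 == 0 then [x] else []) ++ pvOuts inout rest := by
      unfold pvOuts
      rw [List.filter_cons]
      split_ifs <;> simp
    by_cases hcell : PySem.List.pyGetD v' x 1 = 0
    · by_cases hio1 : PySem.List.pyGetD inout x 0 = 1
      · rw [if_pos hcell, if_pos hio1, ih]
        rw [indc, outc]
        have h0 : ¬ PySem.List.pyGetD inout x 0 = 0 := by rw [hio1]; decide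
        simp [hcell, hio1, h0]
        ring
      · by_cases hio0 : PySem.List.pyGetD inout x 0 = 0
        · rw [if_pos hcell, if_neg hio1, if_pos hio0, ih (c := c) (s := x :: s)]
          rw [indc, outc]
          simp [hcell, hio1, hio0]
        · rw [if_pos hcell, if_neg hio1, if_neg hio0, ih]
          rw [indc, outc]
          simp [hio1, hio0]
    · rw [if_neg hcell, ih]
      rw [indc, outc]
      by_cases hio0 : PySem.List.pyGetD inout x 0 = 0 <;> simp [hcell, hio0]


theorem dfsLoop_nil (graph : List (Int × List Int)) (inout v : List Int) (cnt : Int) :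
    dfsLoop graph inout v [] cnt = cnt := by
  rw [dfsLoop]

theorem dfsLoop_cons_pos (graph : List (Int × List Int)) (inout v : List Int) (place : Int)
    (rest : List Int) (cnt : Int) (hv : PySem.List.pyGetD v place 1 = 0) :
    dfsLoop graph inout v (place :: rest) cnt
      = dfsLoop graph inout (PySem.List.pySetD v place 1)
          ((((pvOuts inout (pvGetG graph place)).filter
              fun nb => PySem.List.pyGetD (PySem.List.pySetD v place 1) nb 1 == 0).reverse ++ []) ++ rest)
          (cnt + pvIndC inout (PySem.List.pySetD v place 1) (pvGetG graph place)) := by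
  rw [dfsLoop, dif_pos hv]
  simp only [foldA_char]

theorem dfsLoop_cons_neg (graph : List (Int × List Int)) (inout v : List Int) (place : Int)
    (rest : List Int) (cnt : Int) (hv : ¬ PySem.List.pyGetD v place 1 = 0) :
    dfsLoop graph inout v (place :: rest) cnt = dfsLoop graph inout v rest cnt := by
  rw [dfsLoop, dif_neg hv]

-- the stack A pushes (reversed, filtered by the fresh visit array) traverses like the raw
-- outdoor neighbour list
theorem push_fix {graph : List (Int × List Int)} {inout : List Int} {nV : Nat}
    (hG : pvGoodG graph inout nV) (v' : List Int) (place : Int) (rest : List Int)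
    (hokr : pvOkL inout rest) :
    eRun graph inout v'
        ((((pvOuts inout (pvGetG graph place)).filter
            fun nb => PySem.List.pyGetD v' nb 1 == 0).reverse ++ []) ++ rest)
      = eRun graph inout v' (pvOuts inout (pvGetG graph place) ++ rest) := by
  rw [List.append_nil]
  have hperm : ((((pvOuts inout (pvGetG graph place)).filter
        fun nb => PySem.List.pyGetD v' nb 1 == 0).reverse) ++ rest).Perm
      ((((pvOuts inout (pvGetG graph place)).filter
        fun nb => PySem.List.pyGetD v' nb 1 == 0)) ++ rest) :=
    (List.reverse_perm _).append_right rest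
  rw [eRun_perm hG (v'.count 0) _ _ hperm _ le_rfl ?_]
  · have := eRun_filter graph inout v' (v'.count 0) v' le_rfl
      (fun x hx => hx) [] (pvOuts inout (pvGetG graph place)) rest
    simpa using this
  · intro y hy
    rcases List.mem_append.mp hy with hy | hy
    · exact pvOkL_outs hG place y (List.mem_filter.mp (List.mem_reverse.mp hy)).1
    · exact hokr y hy

-- A's stack loop computes the reference traversal's count
theorem loop_eq {graph : List (Int × List Int)} {inout : List Int} {nV : Nat}
    (hG : pvGoodG graph inout nV) :
    ∀ z : Nat, ∀ v stack : List Int, ∀ cnt : Int, v.count 0 ≤ z → pvOkL inout stack →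
      dfsLoop graph inout v stack cnt = cnt + (eRun graph inout v stack).1 := by
  intro z
  induction z using Nat.strong_induction_on with
  | _ z IH =>
  intro v stack
  induction stack with
  | nil => intro cnt hz hok; rw [dfsLoop_nil, eRun_nil]; simp
  | cons place rest ihs =>
    intro cnt hz hok
    have hpl := hok place (List.mem_cons_self ..)
    have hokr : pvOkL inout rest := fun y hy => hok y (List.mem_cons_of_mem _ hy)
    by_cases hv : PySem.List.pyGetD v place 1 = 0
    · rw [dfsLoop_cons_pos _ _ _ _ _ _ hv]
      have hz' : (PySem.List.pySetD v place 1).count 0 < z :=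
        lt_of_lt_of_le (pv_zeros_set_lt hv) hz
      have hokstack : pvOkL inout
          ((((pvOuts inout (pvGetG graph place)).filter
              fun nb => PySem.List.pyGetD (PySem.List.pySetD v place 1) nb 1 == 0).reverse ++ []) ++ rest) := by
        intro y hy
        rcases List.mem_append.mp hy with hy | hy
        · rcases List.mem_append.mp hy with hy | hy
          · exact pvOkL_outs hG place y (List.mem_filter.mp (List.mem_reverse.mp hy)).1
          · cases hy
        · exact hokr y hy
      rw [IH _ hz' _ _ _ le_rfl hokstack]
      rw [eRun_cons_pos _ _ _ _ _ ⟨hpl.1, hv⟩]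
      rw [push_fix hG _ place rest hokr]
      ring
    · rw [dfsLoop_cons_neg _ _ _ _ _ _ hv, eRun_cons_neg _ _ _ _ _ (fun h => hv h.2)]
      exact ihs cnt hz hokr


theorem pvIndC_cons_of_ind {inout v' : List Int} {x : Int} (rest : List Int)
    (h1 : PySem.List.pyGetD inout x 0 = 1) (h2 : PySem.List.pyGetD v' x 1 = 0) :
    pvIndC inout v' (x :: rest) = 1 + pvIndC inout v' rest := by
  unfold pvIndC
  rw [List.filter_cons_of_pos (by simp [h1, h2])]
  simp
  omega

theorem pvIndC_cons_of_not {inout v' : List Int} {x : Int} (rest : List Int)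
    (h : ¬(PySem.List.pyGetD inout x 0 = 1 ∧ PySem.List.pyGetD v' x 1 = 0)) :
    pvIndC inout v' (x :: rest) = pvIndC inout v' rest := by
  unfold pvIndC
  rw [List.filter_cons_of_neg (by simp; intro ha hb; exact absurd ⟨ha, hb⟩ h)]

theorem pvOuts_cons_of_out {inout : List Int} {x : Int} (rest : List Int)
    (h : PySem.List.pyGetD inout x 0 = 0) :
    pvOuts inout (x :: rest) = x :: pvOuts inout rest := by
  unfold pvOuts
  rw [List.filter_cons_of_pos (by simpa using h)]

theorem pvOuts_cons_of_not {inout : List Int} {x : Int} (rest : List Int)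
    (h : ¬ PySem.List.pyGetD inout x 0 = 0) :
    pvOuts inout (x :: rest) = pvOuts inout rest := by
  unfold pvOuts
  rw [List.filter_cons_of_neg (by simpa using h)]

-- B's neighbour loop computes the entry indoor count plus the traversal of the outdoor neighbours
theorem nbrs_eq {graph : List (Int × List Int)} {inout : List Int} {nV : Nat}
    (hG : pvGoodG graph inout nV) :
    ∀ f : Nat, ∀ (v nbrs : List Int), v.count 0 < f → (∀ x ∈ nbrs, 0 ≤ x) →
      exploreNbrs graph inout f v nbrs
        = (pvIndC inout v nbrs + (eRun graph inout v (pvOuts inout nbrs)).1,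
           (eRun graph inout v (pvOuts inout nbrs)).2) := by
  intro f
  induction f using Nat.strong_induction_on with
  | _ f IH =>
  intro v nbrs
  induction nbrs generalizing v with
  | nil =>
    intro hf hn
    rw [exploreNbrs]
    simp [pvIndC, pvOuts, eRun_nil]
  | cons x rest ihn =>
    intro hf hn
    have hx0 : (0:Int) ≤ x := hn x (List.mem_cons_self ..)
    have hnr : ∀ y ∈ rest, (0:Int) ≤ y := fun y hy => hn y (List.mem_cons_of_mem _ hy)
    rw [exploreNbrs]
    by_cases hcell : PySem.List.pyGetD v x 1 = 0
    · by_cases hio1 : PySem.List.pyGetD inout x 0 = 1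
      · rw [if_pos hcell, if_pos hio1]
        rw [ihn v hf hnr]
        rw [pvIndC_cons_of_ind rest hio1 hcell,
            pvOuts_cons_of_not rest (by rw [hio1]; decide)]
        simp only [Prod.mk.injEq]
        exact ⟨by ring, trivial⟩
      · by_cases hio0 : PySem.List.pyGetD inout x 0 = 0
        · rw [if_pos hcell, if_neg hio1, if_pos hio0]
          obtain ⟨f', rfl⟩ : ∃ f', f = f' + 1 := ⟨f - 1, by omega⟩
          rw [exploreB, if_neg (fun h => h hcell)]
          have hz1 : (PySem.List.pySetD v x 1).count 0 < f' :=
            Nat.lt_of_lt_of_le (pv_zeros_set_lt hcell) (by omega)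
          rw [IH f' (by omega) (PySem.List.pySetD v x 1) (pvGetG graph x) hz1 (pvOk_getG hG x)]
          have hz2 : ((eRun graph inout (PySem.List.pySetD v x 1)
              (pvOuts inout (pvGetG graph x))).2).count 0 < f' + 1 :=
            Nat.lt_of_le_of_lt
              (Nat.le_trans (eRun_zeros_le ..) (pv_zeros_set_le ..)) hf
          simp only [ihn _ hz2 hnr]
          rw [pvIndC_cons_of_not rest (fun h => hio1 h.1),
              pvOuts_cons_of_out rest hio0,
              eRun_cons_pos _ _ _ _ _ ⟨hx0, hcell⟩,
              eRun_append]
          have hstab : pvIndC inout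
              ((eRun graph inout (PySem.List.pySetD v x 1) (pvOuts inout (pvGetG graph x))).2) rest
              = pvIndC inout v rest := by
            rw [pvIndC_eRun rest (fun y hy => by simpa using (List.mem_filter.mp hy).2) hnr]
            exact pvIndC_set rest hx0 hio0 hnr
          rw [hstab]
          simp only [Prod.mk.injEq]
          exact ⟨by ring, trivial⟩
        · rw [if_pos hcell, if_neg hio1, if_neg hio0]
          rw [ihn v hf hnr]
          rw [pvIndC_cons_of_not rest (fun h => hio1 h.1),
              pvOuts_cons_of_not rest hio0]
    · rw [if_neg hcell]
      rw [ihn v hf hnr]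
      rw [pvIndC_cons_of_not rest (fun h => hcell h.2)]
      by_cases hio0 : PySem.List.pyGetD inout x 0 = 0
      · rw [pvOuts_cons_of_out rest hio0,
            eRun_cons_neg _ _ _ _ _ (fun h => hcell h.2)]
      · rw [pvOuts_cons_of_not rest hio0]

-- B's recursive explorer is the reference traversal of a one-node worklist
theorem explore_eq {graph : List (Int × List Int)} {inout : List Int} {nV : Nat}
    (hG : pvGoodG graph inout nV) (f : Nat) (v : List Int) (p : Int)
    (hf : v.count 0 < f) (hp : 0 ≤ p) :
    exploreB graph inout f v p = eRun graph inout v [p] := by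
  obtain ⟨f', rfl⟩ : ∃ f'', f = f'' + 1 := ⟨f - 1, by omega⟩
  rw [exploreB]
  by_cases hcell : PySem.List.pyGetD v p 1 = 0
  · rw [if_neg (fun h => h hcell)]
    have hz1 : (PySem.List.pySetD v p 1).count 0 < f' :=
      Nat.lt_of_lt_of_le (pv_zeros_set_lt hcell) (by omega)
    rw [nbrs_eq hG f' (PySem.List.pySetD v p 1) (pvGetG graph p) hz1 (pvOk_getG hG p)]
    rw [eRun_cons_pos _ _ _ _ _ ⟨hp, hcell⟩]
    simp
  · rw [if_pos hcell, eRun_cons_neg _ _ _ _ _ (fun h => hcell h.2), eRun_nil]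


theorem exploreB_stop (graph : List (Int × List Int)) (inout : List Int) (f : Nat)
    (v : List Int) (p : Int) (h : PySem.List.pyGetD v p 1 ≠ 0) :
    exploreB graph inout (f + 1) v p = (0, v) := by
  rw [exploreB, if_pos h]


-- ===== VERDICT (by name: the statement is the Claim_ definition above) =====
theorem dfs_spec : Claim_equal_dfs := by
  unfold Claim_equal_dfs
  intro graph start visit inout _hdom hpre
  unfold Spec_dfs dfs dfs_alt
  obtain ⟨_hin, hrest⟩ := hpre
  by_cases h0 : PySem.List.pyGetD inout start 0 = 0
  · rw [if_pos h0, if_pos h0]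
  · rw [if_neg h0, if_neg h0]
    rcases hrest with h0' | ⟨_hvr, hrest2⟩
    · exact absurd h0' h0
    by_cases hv : PySem.List.pyGetD visit start 1 = 0
    · rcases hrest2 with hv' | ⟨hs0, _hkey, hall⟩
      · exact absurd hv hv'
      have hG : pvGoodG graph inout visit.length := by
        intro pr hpr nb hnb
        exact ⟨(hall pr hpr nb hnb).1, (hall pr hpr nb hnb).2.1, (hall pr hpr nb hnb).2.2.1⟩
      rw [dfsLoop_cons_pos _ _ _ _ _ _ hv]
      have hokstack : pvOkL inout
          ((((pvOuts inout (pvGetG graph start)).filter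
              fun nb => PySem.List.pyGetD (PySem.List.pySetD visit start 1) nb 1 == 0).reverse
              ++ []) ++ ([] : List Int)) := by
        intro y hy
        rcases List.mem_append.mp hy with hy | hy
        · rcases List.mem_append.mp hy with hy | hy
          · exact pvOkL_outs hG start y (List.mem_filter.mp (List.mem_reverse.mp hy)).1
          · cases hy
        · cases hy
      rw [loop_eq hG ((PySem.List.pySetD visit start 1).count 0) _ _ _ le_rfl hokstack]
      rw [push_fix hG _ start [] (fun y hy => absurd hy (List.not_mem_nil))]
      rw [explore_eq hG _ _ _ (Nat.lt_succ_self _) hs0]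
      rw [eRun_cons_pos _ _ _ _ _ ⟨hs0, hv⟩]
      simp
    · rw [dfsLoop_cons_neg _ _ _ _ _ _ hv, dfsLoop_nil]
      rw [exploreB_stop _ _ _ _ _ hv]
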